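-- pv_equiv track=rewrite | github.com/PaVaN-02/Battleships | battleship.py | isVertical
-- ===== SOURCE A (Python) =====
-- def isVertical(ship):
--     row=[]
--     col=[]
--     for i in range(len(ship)):
--         row.append(ship[i][0])
--         col.append(ship[i][1])
--     count=0
--     truecount=0
--     c=col[0]
--     for i in range(1,len(ship)):
--         if(c==col[i]):
--            count=count+1
--     if count==len(ship)-1:
--        truecount=truecount+1
--
--     row.sort()
--     count=0
--     for i in range (len(ship)-1):
--         if (row[i]+1==row[i+1]):
--           count=count+1
--     if (count==len(ship)-1):
--         truecount=truecount+1
--     if truecount==2: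
--         return True
--     else:
--         return False
-- ===== SOURCE B (Python) =====
-- def isVertical(ship):
--     rows = [r for r, _ in ship]
--     cols = [c for _, c in ship]
--     c0 = cols[0]
--     same_col = all(c == c0 for c in cols)
--     consecutive = len(set(rows)) == len(rows) and max(rows) - min(rows) == len(rows) - 1
--     return same_col and consecutive
-- ===== Notes on version B (the rewrite author's own statement) =====
-- stated objective: simpler
-- what changed: Replaces the index-counting loops and the sort-and-adjacent-scan consecutiveness test with a closed form: all columns equal, and rows pairwise distinct with max(rows)-min(rows) == len(rows)-1.
import Mathlib
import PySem

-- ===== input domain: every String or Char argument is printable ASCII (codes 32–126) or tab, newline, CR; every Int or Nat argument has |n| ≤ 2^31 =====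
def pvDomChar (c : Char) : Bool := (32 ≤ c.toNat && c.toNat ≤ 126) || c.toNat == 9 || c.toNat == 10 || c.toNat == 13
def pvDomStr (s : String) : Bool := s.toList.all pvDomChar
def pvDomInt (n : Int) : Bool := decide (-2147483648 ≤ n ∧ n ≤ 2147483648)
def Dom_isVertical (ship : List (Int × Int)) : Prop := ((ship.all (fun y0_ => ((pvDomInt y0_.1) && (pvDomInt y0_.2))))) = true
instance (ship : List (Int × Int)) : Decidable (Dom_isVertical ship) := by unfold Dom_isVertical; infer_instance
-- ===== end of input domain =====

-- B replaces A's counting loops and sort-and-adjacent-scan with a closed form (all columns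
-- equal; rows distinct with max-min = len-1); equivalence is about the return value.

-- ===== PORT A =====
def isVertical (ship : List (Int × Int)) : Bool :=
  let rc := (PySem.List.pyRange 0 (PySem.List.len ship)).foldl
      (fun (p : List Int × List Int) i =>
        (p.1 ++ [(PySem.List.pyGetD ship i (0, 0)).1],
         p.2 ++ [(PySem.List.pyGetD ship i (0, 0)).2])) ([], [])
  let row := rc.1
  let col := rc.2
  let c := PySem.List.pyGetD col 0 0          -- col[0]: IndexError on empty ship (Pre_)
  let count1 : Int := (PySem.List.pyRange 1 (PySem.List.len ship)).foldl
      (fun count i => if c == PySem.List.pyGetD col i 0 then count + 1 else count) 0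
  let truecount : Int := if count1 = PySem.List.len ship - 1 then 0 + 1 else 0
  let rowS := PySem.List.sorted row id
  let count2 : Int := (PySem.List.pyRange 0 (PySem.List.len ship - 1)).foldl
      (fun count i =>
        if PySem.List.pyGetD rowS i 0 + 1 == PySem.List.pyGetD rowS (i + 1) 0
        then count + 1 else count) 0
  let truecount := if count2 = PySem.List.len ship - 1 then truecount + 1 else truecount
  if truecount = 2 then true else false

-- ===== PORT B =====
def isVertical_alt (ship : List (Int × Int)) : Bool :=
  let rows := ship.map Prod.fst
  let cols := ship.map Prod.snd
  let c0 := PySem.List.pyGetD cols 0 0        -- cols[0]: IndexError on empty ship (Pre_)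
  let sameCol := cols.all (fun c => c == c0)
  let consecutive :=
    ((PySem.Set.ofList rows : List Int).length == rows.length)
      && ((PySem.List.max? rows id).getD 0 - (PySem.List.min? rows id).getD 0
            == PySem.List.len rows - 1)
  sameCol && consecutive

-- ===== PRECONDITION & SPEC =====
-- Pre_ excludes only the empty list, on which A (and B) raise IndexError at col[0].
def Pre_isVertical (ship : List (Int × Int)) : Prop := ship ≠ []
instance (ship : List (Int × Int)) : Decidable (Pre_isVertical ship) := by
  unfold Pre_isVertical; infer_instance

def pvWitness_isVertical : (List (Int × Int)) := [(2, 5), (3, 5), (4, 5)]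

def Spec_isVertical (ship : List (Int × Int)) (out : Bool) : Prop := out = isVertical_alt ship
instance (ship : List (Int × Int)) (out : Bool) : Decidable (Spec_isVertical ship out) := by
  unfold Spec_isVertical; infer_instance

-- ===== CLAIM (what is proved, stated in full; the proofs are below) =====
def Claim_equal_isVertical : Prop := ∀ (ship : List (Int × Int)), Dom_isVertical ship →
  Pre_isVertical ship → Spec_isVertical ship (isVertical ship)

-- ===== LEMMAS AND PROOFS =====

-- first element of a ≤-sorted list is a lower bound
theorem pv_head_le {s : List Int} (hp : List.Pairwise (· ≤ ·) s) (h : s ≠ []) :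
    ∀ y ∈ s, s.head h ≤ y := by
  intro y hy
  obtain ⟨i, hi, rfl⟩ := List.mem_iff_getElem.mp hy
  rw [List.head_eq_getElem]
  rcases Nat.eq_zero_or_pos i with h0 | h0
  · subst h0; exact le_refl _
  · exact List.pairwise_iff_getElem.mp hp 0 i (by omega) hi h0

-- last element of a ≤-sorted list is an upper bound
theorem pv_le_getLast {s : List Int} (hp : List.Pairwise (· ≤ ·) s) (h : s ≠ []) :
    ∀ y ∈ s, y ≤ s.getLast h := by
  intro y hy
  obtain ⟨i, hi, rfl⟩ := List.mem_iff_getElem.mp hy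
  rw [List.getLast_eq_getElem]
  rcases Nat.lt_or_ge i (s.length - 1) with h0 | h0
  · exact List.pairwise_iff_getElem.mp hp i (s.length - 1) hi (by omega) h0
  · have : i = s.length - 1 := by omega
    subst this; exact le_refl _

-- strictly increasing integers spread by at least their count
theorem pv_spread : ∀ (s : List Int), List.Pairwise (· < ·) s → ∀ (h : s ≠ []),
    (s.length : Int) - 1 ≤ s.getLast h - s.head h := by
  intro s
  induction s with
  | nil => intro _ h; exact absurd rfl h
  | cons a t ih =>
    intro hp h
    cases t with
    | nil => simp
    | cons b u =>
      have hp' := hp.tail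
      have hab : a < b := (List.pairwise_cons.mp hp).1 b (by simp)
      have := ih hp' (by simp)
      rw [List.getLast_cons (by simp)]
      simp only [List.head_cons] at *
      simp only [List.length_cons] at *
      omega

-- the key characterisation: on a ≤-sorted nonempty list, "every adjacent pair steps by 1"
-- is exactly "no duplicates and last - first = length - 1"
theorem pv_chain_iff : ∀ (s : List Int), List.Pairwise (· ≤ ·) s → ∀ (h : s ≠ []),
    (List.IsChain (fun a b => a + 1 = b) s ↔
      s.Nodup ∧ s.getLast h - s.head h = (s.length : Int) - 1) := by
  intro s
  induction s with
  | nil => intro _ h; exact absurd rfl h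
  | cons a t ih =>
    intro hp h
    cases t with
    | nil => simp
    | cons b u =>
      have hp' := hp.tail
      have hbu : (b :: u) ≠ [] := by simp
      have hiff := ih hp' hbu
      have hlast : (a :: b :: u).getLast h = (b :: u).getLast hbu := List.getLast_cons hbu
      rw [List.isChain_cons_cons, hlast]
      constructor
      · rintro ⟨hab, hc'⟩
        obtain ⟨hnd, hdiff⟩ := hiff.mp hc'
        refine ⟨List.nodup_cons.mpr ⟨?_, hnd⟩, ?_⟩
        · intro hmem
          rcases List.mem_cons.mp hmem with hEq | hu
          · omega
          · have := (List.pairwise_cons.mp hp').1 a hu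
            omega
        · simp only [List.head_cons, List.length_cons] at *
          push_cast at *
          omega
      · rintro ⟨hnd, hdiff⟩
        have hab : a < b := by
          have h1 : a ≤ b := (List.pairwise_cons.mp hp).1 b (by simp)
          have h2 : a ≠ b := by
            intro hEq; exact (List.nodup_cons.mp hnd).1 (hEq ▸ (by simp : b ∈ b :: u))
          omega
        have hlt : List.Pairwise (· < ·) (b :: u) := by
          have := List.Pairwise.and hp' (List.nodup_cons.mp hnd).2
          exact this.imp (fun hx => lt_of_le_of_ne hx.1 hx.2)
        have hspread := pv_spread (b :: u) hlt hbu
        simp only [List.head_cons, List.length_cons] at *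
        push_cast at *
        refine ⟨by omega, hiff.mpr ⟨(List.nodup_cons.mp hnd).2, ?_⟩⟩
        omega

-- distinct-count test: len(set(rows)) == len(rows) means Nodup
theorem pv_ofList_len (xs : List Int) :
    ((PySem.Set.ofList xs : List Int).length = xs.length) ↔ xs.Nodup := by
  constructor
  · intro hlen
    by_contra hnd
    have hperm : (PySem.Set.ofList xs : List Int).Perm xs.dedup :=
      (List.perm_ext_iff_of_nodup (PySem.Set.nodup_ofList xs) xs.nodup_dedup).mpr
        (fun x => by rw [PySem.Set.mem_ofList, List.mem_dedup])
    have hlt : xs.dedup.length < xs.length := by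
      rcases (xs.dedup_sublist.length_le).lt_or_eq with h2 | h2
      · exact h2
      · exact absurd (xs.dedup_sublist.eq_of_length h2 ▸ xs.nodup_dedup) hnd
    have := hperm.length_eq
    omega
  · intro hnd; rw [PySem.Set.ofList_eq_self_of_nodup xs hnd]

theorem pv_max_eq (rows : List Int) (hne : rows ≠ [])
    (hs : PySem.List.sorted rows id ≠ []) :
    (PySem.List.max? rows id).getD 0 = (PySem.List.sorted rows id).getLast hs := by
  cases hm : PySem.List.max? rows id with
  | none => exact absurd ((PySem.List.max?_eq_none_iff rows id).mp hm) hne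
  | some m =>
    have hperm := PySem.List.sorted_perm rows id false
    have hsp : List.Pairwise (· ≤ ·) (PySem.List.sorted rows id) := by
      simpa using PySem.List.sorted_pairwise rows id
    have h1 : m ≤ (PySem.List.sorted rows id).getLast hs :=
      pv_le_getLast hsp hs m (hperm.mem_iff.mpr (PySem.List.max?_mem hm))
    have h2 : (PySem.List.sorted rows id).getLast hs ≤ m := by
      simpa using PySem.List.max?_isMax hm _ (hperm.subset (List.getLast_mem hs))
    simpa using le_antisymm h1 h2

theorem pv_min_eq (rows : List Int) (hne : rows ≠ [])
    (hs : PySem.List.sorted rows id ≠ []) :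
    (PySem.List.min? rows id).getD 0 = (PySem.List.sorted rows id).head hs := by
  cases hm : PySem.List.min? rows id with
  | none => exact absurd ((PySem.List.min?_eq_none_iff rows id).mp hm) hne
  | some m =>
    have hperm := PySem.List.sorted_perm rows id false
    have hsp : List.Pairwise (· ≤ ·) (PySem.List.sorted rows id) := by
      simpa using PySem.List.sorted_pairwise rows id
    have h1 : (PySem.List.sorted rows id).head hs ≤ m := by
      have := pv_head_le hsp hs m (hperm.mem_iff.mpr (PySem.List.min?_mem hm))
      simpa using this
    have h2 : m ≤ (PySem.List.sorted rows id).head hs := by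
      simpa using PySem.List.min?_isMin hm _ (hperm.subset (List.head_mem hs))
    simpa using le_antisymm h2 h1

-- A's first loop builds exactly (map fst, map snd)
theorem pv_build (ship : List (Int × Int)) :
    (PySem.List.pyRange 0 (PySem.List.len ship)).foldl
      (fun (p : List Int × List Int) i =>
        (p.1 ++ [(PySem.List.pyGetD ship i (0, 0)).1],
         p.2 ++ [(PySem.List.pyGetD ship i (0, 0)).2])) ([], [])
    = (ship.map Prod.fst, ship.map Prod.snd) := by
  rw [PySem.List.len_eq, PySem.List.pyRange_zero_natCast, List.foldl_map,
    PySem.List.foldl_prod_mk (fun (s : List Int) (e : Nat) => s ++ [(PySem.List.pyGetD ship (↑e) (0, 0)).1])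
      (fun (s : List Int) (e : Nat) => s ++ [(PySem.List.pyGetD ship (↑e) (0, 0)).2]),
    PySem.List.foldl_append_singleton_eq_map, PySem.List.foldl_append_singleton_eq_map]
  simp only [List.nil_append, Prod.mk.injEq]
  constructor <;>
  · apply List.ext_getElem (by simp)
    intro i h1 h2
    simp only [List.getElem_map, List.getElem_range, PySem.List.pyGetD_natCast]
    rw [List.getD_eq_getElem _ _ (by simpa using h1)]

-- A's column-count condition says: every column equals column 0
theorem pv_cond1_iff (cols : List Int) (n : Nat) (hn : cols.length = n) (hne : cols ≠ []) :
    ((0:Int) + ↑(List.countP (fun i => cols.getD 0 0 == PySem.List.pyGetD cols i 0)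
        (PySem.List.pyRange 1 ↑n)) = ↑n - 1)
      ↔ cols.all (fun x => x == cols.getD 0 0) = true := by
  have hn1 : 1 ≤ n := by
    have := List.length_pos_of_ne_nil hne; omega
  have hlen : (PySem.List.pyRange 1 (↑n : Int)).length = n - 1 := by
    rw [PySem.List.length_pyRange_one]; omega
  have hle := List.countP_le_length
    (p := fun i => cols.getD 0 0 == PySem.List.pyGetD cols i 0)
    (l := PySem.List.pyRange 1 (↑n : Int))
  rw [hlen] at hle
  have hc0 : cols.getD 0 0 = cols[0]'(by omega) := List.getD_eq_getElem _ _ (by omega)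
  constructor
  · intro hcnt
    have hall : ∀ i ∈ PySem.List.pyRange 1 (↑n : Int),
        (cols.getD 0 0 == PySem.List.pyGetD cols i 0) = true := by
      apply List.countP_eq_length.mp
      rw [hlen]; omega
    rw [List.all_eq_true]
    intro x hx
    obtain ⟨k, hk, rfl⟩ := List.mem_iff_getElem.mp hx
    rcases Nat.eq_zero_or_pos k with h0 | h0
    · subst h0; rw [beq_iff_eq, hc0]
    · have := hall (↑k : Int) (PySem.List.mem_pyRange_one.mpr ⟨by omega, by omega⟩)
      rw [PySem.List.pyGetD_eq_getElem _ _ (by omega) (by exact_mod_cast hk)] at this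
      rw [beq_iff_eq] at this ⊢
      simp only [Int.toNat_natCast] at this
      omega
  · intro hall
    have : List.countP (fun i => cols.getD 0 0 == PySem.List.pyGetD cols i 0)
        (PySem.List.pyRange 1 (↑n : Int)) = n - 1 := by
      rw [← hlen]
      apply List.countP_eq_length.mpr
      intro i hi
      obtain ⟨h1i, h2i⟩ := PySem.List.mem_pyRange_one.mp hi
      rw [PySem.List.pyGetD_eq_getElem _ _ (by omega) (by omega)]
      have hmem : cols[i.toNat]'(by omega) ∈ cols := List.getElem_mem _
      have := List.all_eq_true.mp hall _ hmem
      rw [beq_iff_eq] at this ⊢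
      omega
    omega

-- A's sorted-adjacent condition says: the sorted rows step by exactly 1
theorem pv_cond2_iff (s : List Int) (n : Nat) (hn : s.length = n)
    (hsp : List.Pairwise (· ≤ ·) s) (hne : s ≠ []) :
    ((0:Int) + ↑(List.countP
        (fun i => PySem.List.pyGetD s i 0 + 1 == PySem.List.pyGetD s (i + 1) 0)
        (PySem.List.pyRange 0 (↑n - 1))) = ↑n - 1)
      ↔ (s.Nodup ∧ s.getLast hne - s.head hne = (↑n : Int) - 1) := by
  have hn1 : 1 ≤ n := by
    have := List.length_pos_of_ne_nil hne; omega
  have hlen : (PySem.List.pyRange 0 ((↑n : Int) - 1)).length = n - 1 := by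
    rw [PySem.List.length_pyRange_one]; omega
  have hle := List.countP_le_length
    (p := fun i => PySem.List.pyGetD s i 0 + 1 == PySem.List.pyGetD s (i + 1) 0)
    (l := PySem.List.pyRange 0 ((↑n : Int) - 1))
  rw [hlen] at hle
  have hchain : List.IsChain (fun a b => a + 1 = b) s ↔
      (∀ i ∈ PySem.List.pyRange 0 ((↑n : Int) - 1),
        (PySem.List.pyGetD s i 0 + 1 == PySem.List.pyGetD s (i + 1) 0) = true) := by
    rw [List.isChain_iff_getElem]
    constructor
    · intro h i hi
      obtain ⟨h1i, h2i⟩ := PySem.List.mem_pyRange_one.mp hi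
      have e1 := PySem.List.pyGetD_eq_getElem s (i := i) 0 (by omega) (by omega)
      have e2 := PySem.List.pyGetD_eq_getElem s (i := i + 1) 0 (by omega) (by omega)
      have htn : (i + 1).toNat = i.toNat + 1 := by omega
      simp only [htn] at e2
      rw [beq_iff_eq, e1, e2]
      exact h i.toNat (by omega)
    · intro h i hi
      have hmem := h (↑i : Int) (PySem.List.mem_pyRange_one.mpr ⟨by omega, by omega⟩)
      have e1 := PySem.List.pyGetD_eq_getElem s (i := (↑i : Int)) 0 (by omega) (by omega)
      have e2 := PySem.List.pyGetD_eq_getElem s (i := (↑i : Int) + 1) 0 (by omega) (by omega)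
      have htn : ((↑i : Int) + 1).toNat = i + 1 := by omega
      simp only [htn, Int.toNat_natCast] at e1 e2
      rw [beq_iff_eq, e1, e2] at hmem
      exact hmem
  have hkey := pv_chain_iff s hsp hne
  rw [hn] at hkey
  constructor
  · intro hcnt
    refine hkey.mp (hchain.mpr (List.countP_eq_length.mp ?_))
    rw [hlen]; omega
  · intro hgoal
    have := List.countP_eq_length.mpr (hchain.mp (hkey.mpr hgoal))
    rw [hlen] at this
    omega

-- ===== VERDICT (by name: the statement is the Claim_ definition above) =====
theorem isVertical_spec : Claim_equal_isVertical := by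
  intro ship _ hpre
  have hpre' : ship ≠ [] := hpre
  have hn1 : 1 ≤ ship.length := List.length_pos_of_ne_nil hpre'
  unfold Spec_isVertical
  simp only [isVertical, isVertical_alt]
  rw [pv_build]
  simp only [PySem.List.len_eq, PySem.List.pyGetD_zero, PySem.List.foldl_count_if,
    List.length_map]
  have hrows_ne : ship.map Prod.fst ≠ [] := by simpa using hpre'
  have hcols_ne : ship.map Prod.snd ≠ [] := by simpa using hpre'
  set rows := ship.map Prod.fst with hrows
  set cols := ship.map Prod.snd with hcols
  have hs_ne : PySem.List.sorted rows id ≠ [] := by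
    intro h0
    have hp := PySem.List.sorted_perm rows id false
    rw [h0] at hp
    exact hrows_ne hp.symm.eq_nil
  set s := PySem.List.sorted rows id with hsdef
  have hsp : List.Pairwise (· ≤ ·) s := by
    simpa [hsdef] using PySem.List.sorted_pairwise rows id
  have hrlen : rows.length = ship.length := by rw [hrows, List.length_map]
  have hslen : s.length = ship.length := by
    rw [hsdef, (PySem.List.sorted_perm rows id false).length_eq, hrlen]
  have h1 := pv_cond1_iff cols ship.length (by rw [hcols, List.length_map]) hcols_ne
  have h2 := pv_cond2_iff s ship.length hslen hsp hs_ne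
  have hnd : s.Nodup ↔ rows.Nodup := (PySem.List.sorted_perm rows id false).nodup_iff
  have hmax := pv_max_eq rows hrows_ne hs_ne
  have hmin := pv_min_eq rows hrows_ne hs_ne
  have hB : (s.Nodup ∧ s.getLast hs_ne - s.head hs_ne = (↑ship.length : Int) - 1) ↔
      ((((PySem.Set.ofList rows : List Int).length == ship.length)
        && ((PySem.List.max? rows id).getD 0 - (PySem.List.min? rows id).getD 0
              == (↑ship.length : Int) - 1)) = true) := by
    rw [Bool.and_eq_true, beq_iff_eq, beq_iff_eq, hmax, hmin]
    constructor
    · rintro ⟨hnd', hdiff'⟩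
      exact ⟨by rw [← hrlen, pv_ofList_len]; exact hnd.mp hnd', hdiff'⟩
    · rintro ⟨hlen', hdiff'⟩
      exact ⟨hnd.mpr (by rw [← pv_ofList_len]; omega), hdiff'⟩
  simp only [h1, h2, hB]
  by_cases hA' : cols.all (fun x => x == cols.getD 0 0) = true
  · by_cases hB' : (((PySem.Set.ofList rows : List Int).length == ship.length)
        && ((PySem.List.max? rows id).getD 0 - (PySem.List.min? rows id).getD 0
              == (↑ship.length : Int) - 1)) = true
    · rw [if_pos hA', if_pos hB', hA', hB']; norm_num
    · rw [if_pos hA', if_neg hB', (Bool.not_eq_true _).mp hB', hA']; norm_num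
  · by_cases hB' : (((PySem.Set.ofList rows : List Int).length == ship.length)
        && ((PySem.List.max? rows id).getD 0 - (PySem.List.min? rows id).getD 0
              == (↑ship.length : Int) - 1)) = true
    · rw [if_neg hA', if_pos hB', (Bool.not_eq_true _).mp hA', hB']; norm_num
    · rw [if_neg hA', if_neg hB', (Bool.not_eq_true _).mp hA',
        (Bool.not_eq_true _).mp hB']; norm_num
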